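-- pv_equiv track=rewrite | github.com/air-flow/Python-tprint | src/tutorial/mysql.py | GetColumnValue
-- ===== SOURCE A (Python) =====
-- def MoreStrLne(data):
--     return len(max(map(str,data),key=len)) + 1
--
-- def GetValueList(key,data):
--     temp = [i[key] for i in data]
--     return temp
--
-- def GetColumnValue(data):
--     key_list = data[0].keys()
--     result = []
--     for i in key_list:
--         temp = GetValueList(i,data)
--         temp.append(i)
--         result.append(MoreStrLne(temp))
--     return result
-- ===== SOURCE B (Python) =====
-- def GetColumnValue(data):
--     keys = list(data[0].keys())
--     widths = [len(str(k)) for k in keys]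
--     for row in data:
--         widths = [max(w, len(str(row[k]))) for w, k in zip(widths, keys)]
--     return [w + 1 for w in widths]
-- ===== Notes on version B (the rewrite author's own statement) =====
-- stated objective: alternative
-- what changed: Replaces the column-major pass (materializing each column as a list plus the header and calling max on it) by a single row-major pass that keeps one running-maximum width per column, updated with zip over the rows; it trades the per-column list building for O(cols) running state.
import Mathlib
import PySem

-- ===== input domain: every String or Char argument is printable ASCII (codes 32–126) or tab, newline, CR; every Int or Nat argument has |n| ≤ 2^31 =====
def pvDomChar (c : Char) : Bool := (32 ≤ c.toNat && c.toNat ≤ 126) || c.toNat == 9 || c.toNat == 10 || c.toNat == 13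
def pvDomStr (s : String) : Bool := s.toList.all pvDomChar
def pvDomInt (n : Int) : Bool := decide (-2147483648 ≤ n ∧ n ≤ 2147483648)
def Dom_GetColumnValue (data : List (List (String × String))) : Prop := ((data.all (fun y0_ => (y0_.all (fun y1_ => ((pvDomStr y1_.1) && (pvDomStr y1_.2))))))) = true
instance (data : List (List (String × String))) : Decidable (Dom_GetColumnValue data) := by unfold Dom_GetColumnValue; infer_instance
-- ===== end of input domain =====

-- B does one row-major pass keeping a running maximum width per column instead of
-- A's column-major pass that materializes each column list and calls max on it.

-- row[k] on a dict-as-association-list: first match; none = KeyError, excluded by Pre_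
def pyLookup (row : List (String × String)) (k : String) : String :=
  ((row.find? (fun p => p.1 == k)).map (·.2)).getD ""

-- ===== PORT A =====
-- len(max(map(str,data),key=len)) + 1; max keeps the FIRST longest element.
-- l = [] is unreachable (Python max would raise): every call site appends the key first.
def MoreStrLne (l : List String) : Int :=
  match l with
  | [] => 0
  | h :: t =>
    PySem.Str.len (t.foldl (fun m x => if PySem.Str.len x > PySem.Str.len m then x else m) h) + 1

def GetValueList (key : String) (data : List (List (String × String))) : List String :=
  data.map (fun row => pyLookup row key)

def GetColumnValue (data : List (List (String × String))) : List Int :=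
  -- data[0].keys(): IndexError on empty data is excluded by Pre_
  let key_list := PySem.List.dedup ((data.headD []).map Prod.fst)
  key_list.foldl (fun result i => result ++ [MoreStrLne (GetValueList i data ++ [i])]) []

-- ===== PORT B =====
def GetColumnValue_alt (data : List (List (String × String))) : List Int :=
  let keys := PySem.List.dedup ((data.headD []).map Prod.fst)
  let widths0 := keys.map (fun k => PySem.Str.len k)
  let widths := data.foldl
    (fun ws row => List.zipWith (fun w k => max w (PySem.Str.len (pyLookup row k))) ws keys)
    widths0
  widths.map (· + 1)

-- ===== PRECONDITION & SPEC =====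
-- Pre_ excludes exactly the inputs where Python A raises: empty data (IndexError on
-- data[0]) and rows missing a key of the first row (KeyError); B raises there too.
def Pre_GetColumnValue (data : List (List (String × String))) : Prop :=
  data ≠ [] ∧ ∀ row ∈ data, ∀ k ∈ PySem.List.dedup ((data.headD []).map Prod.fst),
    k ∈ row.map Prod.fst
instance (data : List (List (String × String))) : Decidable (Pre_GetColumnValue data) := by
  unfold Pre_GetColumnValue; infer_instance

def pvWitness_GetColumnValue : (List (List (String × String))) :=
  [[("id", "1"), ("name", "ann")], [("id", "23"), ("name", "b")]]

def Spec_GetColumnValue (data : List (List (String × String))) (out : List Int) : Prop := out = GetColumnValue_alt data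
instance (data : List (List (String × String))) (out : List Int) : Decidable (Spec_GetColumnValue data out) := by unfold Spec_GetColumnValue; infer_instance

-- ===== CLAIM (what is proved, stated in full; the proofs are below) =====
def Claim_equal_GetColumnValue : Prop := ∀ (data : List (List (String × String))), Dom_GetColumnValue data → Pre_GetColumnValue data → Spec_GetColumnValue data (GetColumnValue data)

-- ===== LEMMAS AND PROOFS =====

-- running max of lengths, B's per-column quantity
def maxLen (a : Int) (l : List String) : Int :=
  l.foldl (fun a x => max a (PySem.Str.len x)) a

theorem len_firstMax (t : List String) (m : String) :
    PySem.Str.len (t.foldl (fun m x => if PySem.Str.len x > PySem.Str.len m then x else m) m)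
      = maxLen (PySem.Str.len m) t := by
  induction t generalizing m with
  | nil => rfl
  | cons x t ih =>
    simp only [List.foldl, maxLen] at *
    rw [ih]
    congr 1
    split_ifs with h <;> omega

theorem maxLen_max (l : List String) : ∀ a b, maxLen (max a b) l = max a (maxLen b l) := by
  induction l with
  | nil => intro a b; rfl
  | cons x l ih =>
    intro a b
    show maxLen (max (max a b) (PySem.Str.len x)) l = max a (maxLen (max b (PySem.Str.len x)) l)
    rw [max_assoc, ih]

theorem maxLen_append_singleton (a : Int) (l : List String) (x : String) :
    maxLen a (l ++ [x]) = max (maxLen a l) (PySem.Str.len x) := by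
  simp [maxLen, List.foldl_append]

theorem foldl_append_map {α β : Type} (f : α → β) :
    ∀ (l : List α) (acc : List β), l.foldl (fun r i => r ++ [f i]) acc = acc ++ l.map f := by
  intro l
  induction l with
  | nil => simp
  | cons x l ih => intro acc; simp [List.foldl, ih]

theorem zipWith_id_left {α β : Type} :
    ∀ (ws : List α) (ks : List β), ws.length = ks.length →
      List.zipWith (fun w _ => w) ws ks = ws := by
  intro ws
  induction ws with
  | nil => intro ks _; rfl
  | cons w ws ih =>
    intro ks h
    cases ks with
    | nil => simp at h
    | cons k ks => simp_all [List.zipWith]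

theorem zipWith_zipWith_right {α β γ δ : Type} (f : γ → β → δ) (g : α → β → γ) :
    ∀ (ws : List α) (ks : List β),
      List.zipWith f (List.zipWith g ws ks) ks = List.zipWith (fun w k => f (g w k) k) ws ks := by
  intro ws
  induction ws with
  | nil => intro ks; rfl
  | cons w ws ih =>
    intro ks
    cases ks with
    | nil => rfl
    | cons k ks => simp [List.zipWith, ih]

theorem zipWith_map_left {α β γ : Type} (f : β → α → γ) (g : α → β) :
    ∀ (l : List α), List.zipWith f (l.map g) l = l.map (fun k => f (g k) k) := by
  intro l
  induction l with
  | nil => rfl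
  | cons x l ih => simp [ih]

-- invariant of B's row loop: each slot holds the running max of lengths seen so far
theorem rows_fold (keys : List String) :
    ∀ (data : List (List (String × String))) (ws : List Int), ws.length = keys.length →
      data.foldl
        (fun ws row => List.zipWith (fun w k => max w (PySem.Str.len (pyLookup row k))) ws keys)
        ws
      = List.zipWith (fun w k => maxLen w (data.map (fun row => pyLookup row k))) ws keys := by
  intro data
  induction data with
  | nil =>
    intro ws h
    simp only [List.foldl, List.map_nil]
    exact (zipWith_id_left ws keys h).symm
  | cons row rest ih =>
    intro ws h
    simp only [List.foldl]
    rw [ih _ (by simp [h])]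
    rw [zipWith_zipWith_right]
    rfl

theorem GetColumnValue_spec_aux (r0 : List (String × String)) (rest : List (List (String × String))) :
    GetColumnValue (r0 :: rest) = GetColumnValue_alt (r0 :: rest) := by
  unfold GetColumnValue GetColumnValue_alt
  simp only [List.headD]
  rw [foldl_append_map, rows_fold _ _ _ (by simp), zipWith_map_left]
  simp only [List.nil_append, List.map_map]
  apply List.map_congr_left
  intro k _
  simp only [Function.comp]
  unfold GetValueList MoreStrLne
  simp only [List.map_cons, List.cons_append]
  rw [len_firstMax, maxLen_append_singleton]
  show maxLen (PySem.Str.len (pyLookup r0 k)) (rest.map fun row => pyLookup row k) ⊔ PySem.Str.len k + 1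
    = maxLen (PySem.Str.len k) (pyLookup r0 k :: rest.map fun row => pyLookup row k) + 1
  show _ = maxLen (max (PySem.Str.len k) (PySem.Str.len (pyLookup r0 k))) (rest.map fun row => pyLookup row k) + 1
  rw [maxLen_max, max_comm]

-- ===== VERDICT (by name: the statement is the Claim_ definition above) =====
theorem GetColumnValue_spec : Claim_equal_GetColumnValue := by
  intro data _ hpre
  cases data with
  | nil => exact absurd rfl hpre.1
  | cons r0 rest => exact GetColumnValue_spec_aux r0 rest
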